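-- pv_equiv track=rewrite | github.com/dvlprwchoi/edabit_python | calculated_bonus/calculated_bonus.py | bonus
-- ===== SOURCE A (Python) =====
-- def bonus(days):
--     total = 0
--     for i in range(1, days+1):
--         if 32 < i <= 40:
--             total += 325
--         if 40 < i <= 48:
--             total += 550
--         if i > 48:
--             total += 600
--     return total
-- ===== SOURCE B (Python) =====
-- def bonus(days):
--     # closed form: count of days in each tier band times its rate
--     return (325 * max(0, min(days, 40) - 32)
--             + 550 * max(0, min(days, 48) - 40)
--             + 600 * max(0, days - 48))
-- ===== Notes on version B (the rewrite author's own statement) =====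
-- stated objective: faster
-- what changed: Replaced the per-day loop with a closed form counting the days falling in each tier band via max/min arithmetic.
import Mathlib
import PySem

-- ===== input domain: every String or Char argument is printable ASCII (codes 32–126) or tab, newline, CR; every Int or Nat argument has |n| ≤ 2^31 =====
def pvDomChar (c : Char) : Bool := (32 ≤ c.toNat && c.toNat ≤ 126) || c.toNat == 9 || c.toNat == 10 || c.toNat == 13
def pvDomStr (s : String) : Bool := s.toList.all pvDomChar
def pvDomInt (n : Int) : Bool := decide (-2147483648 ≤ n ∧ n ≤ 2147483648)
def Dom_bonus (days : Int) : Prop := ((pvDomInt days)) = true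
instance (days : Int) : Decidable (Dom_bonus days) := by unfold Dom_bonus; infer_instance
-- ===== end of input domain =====

-- B replaces A's per-day loop by an O(1) closed form counting the days in each tier band.

-- ===== PORT A =====
def bonusStep (total : Int) (i : Int) : Int :=
  let total := if 32 < i ∧ i ≤ 40 then total + 325 else total
  let total := if 40 < i ∧ i ≤ 48 then total + 550 else total
  if i > 48 then total + 600 else total

def bonus (days : Int) : Int :=
  (PySem.List.pyRange 1 (days + 1) 1).foldl bonusStep 0

-- ===== PORT B =====
def bonus_alt (days : Int) : Int :=
  325 * max 0 (min days 40 - 32) + 550 * max 0 (min days 48 - 40) + 600 * max 0 (days - 48)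

-- ===== PRECONDITION & SPEC =====
def Spec_bonus (days : Int) (out : Int) : Prop := out = bonus_alt days
instance (days : Int) (out : Int) : Decidable (Spec_bonus days out) := by unfold Spec_bonus; infer_instance

-- ===== CLAIM (what is proved, stated in full; the proofs are below) =====
def Claim_equal_bonus : Prop := ∀ (days : Int), Dom_bonus days → Spec_bonus days (bonus days)

-- ===== LEMMAS AND PROOFS =====
theorem bonus_nat (n : Nat) : bonus (n : Int) = bonus_alt (n : Int) := by
  induction n with
  | zero => simp [bonus, bonus_alt, PySem.List.pyRange_one_eq_nil]
  | succ n ih =>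
    have h : PySem.List.pyRange 1 ((n : Int) + 1 + 1) 1
        = PySem.List.pyRange 1 ((n : Int) + 1) 1 ++ [(n : Int) + 1] :=
      PySem.List.pyRange_one_succ_right (by omega)
    have : bonus ((n : Int) + 1) = bonusStep (bonus (n : Int)) ((n : Int) + 1) := by
      simp [bonus, h, List.foldl_append]
    rw [show ((n + 1 : Nat) : Int) = (n : Int) + 1 by push_cast; ring, this, ih]
    simp only [bonusStep, bonus_alt]
    split_ifs <;> omega

theorem bonus_eq (days : Int) : bonus days = bonus_alt days := by
  by_cases h : 0 ≤ days
  · have := bonus_nat days.toNat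
    rwa [Int.toNat_of_nonneg h] at this
  · rw [bonus, PySem.List.pyRange_one_eq_nil (by omega : days + 1 ≤ 1)]
    simp [bonus_alt]; omega

-- ===== VERDICT (by name: the statement is the Claim_ definition above) =====
theorem bonus_spec : Claim_equal_bonus := by
  intro days _
  exact (bonus_eq days).symm ▸ rfl
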